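-- pv_equiv track=rewrite | github.com/naszka/uncertain_builder | data/utils.py | orientation_ambiguity
-- ===== SOURCE A (Python) =====
-- def orientation_ambiguity(s):
--     def convert(words):
--         out_words = []
--         # Iterate through the list of words
--         for i in range(len(words)):
--             # Check if the current word is a number
--             if (words[i].lower() in ["facing", "heading"]) and (
--                 words[i + 1].lower().strip(",") in ["north", "east", "west", "south"]
--             ):
--                 continue
--             if (
--                 words[i].lower().lower().strip(",")
--                 in ["north", "east", "west", "south"]
--             ) and (words[i - 1].lower() in ["facing", "heading"]):
--                 continue
--             out_words.append(words[i])
--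
--         # Join the list of words back into a string and return it
--         return out_words
--
--     words = s.split()
--     words = convert(words)
--
--     return " ".join(words)
-- ===== SOURCE B (Python) =====
-- def orientation_ambiguity(s):
--     words = s.split()
--     out = []
--     i = 0
--     n = len(words)
--     while i < n:
--         if (
--             i + 1 < n
--             and words[i].lower() in ("facing", "heading")
--             and words[i + 1].lower().strip(",") in ("north", "east", "west", "south")
--         ):
--             i += 2
--         else:
--             out.append(words[i])
--             i += 1
--     return " ".join(out)
-- ===== Notes on version B (the rewrite author's own statement) =====
-- stated objective: simpler
-- what changed: Replaced A's per-index scan (which re-tests every word against both its successor and its predecessor, with a words[-1] wraparound at index 0) by a forward two-pointer that consumes a matched facing/heading + direction pair in one step, so each pair is recognised once instead of twice and no backward lookup is needed.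
-- outside the precondition, e.g. on orientation_ambiguity('facing'): A raises IndexError, B returns 'facing'; on orientation_ambiguity('heading'): A raises IndexError, B returns 'heading'; on orientation_ambiguity('go heading'): A raises IndexError, B returns 'go heading'
-- crash fix: When the last whitespace-separated word lowercases to 'facing' or 'heading', A raises IndexError on the words[i+1] lookahead; B simply keeps that trailing word (no following direction word, so the pair cannot match). — e.g. on orientation_ambiguity("go heading"): A raises IndexError, B returns "go heading"
import Mathlib
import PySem

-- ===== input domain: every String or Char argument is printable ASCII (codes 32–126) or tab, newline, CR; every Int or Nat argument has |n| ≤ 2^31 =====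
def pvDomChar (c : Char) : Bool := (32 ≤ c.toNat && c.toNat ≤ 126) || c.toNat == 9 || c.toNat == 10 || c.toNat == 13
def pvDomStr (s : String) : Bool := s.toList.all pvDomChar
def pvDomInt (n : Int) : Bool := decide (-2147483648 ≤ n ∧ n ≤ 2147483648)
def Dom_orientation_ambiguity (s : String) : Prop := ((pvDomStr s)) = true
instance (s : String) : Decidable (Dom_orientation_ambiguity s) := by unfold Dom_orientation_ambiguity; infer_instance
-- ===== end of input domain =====

-- B replaces A's per-index scan (each word tested against both neighbours, with a words[-1]
-- wraparound at index 0) by a forward two-pointer consuming each matched pair once: simpler.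

-- ===== PORT A =====
-- Literal port of A's index loop. Python evaluates `words[i].lower() in [...]` first and only
-- then `words[i + 1]`; when i is the last index and that first test is true Python raises
-- IndexError — exactly the inputs Pre_ excludes, so the pyGetD default "" is never the value
-- the excluded lookup would have produced inside Pre_ (the conjunction short-circuits there).
def orientation_ambiguity (s : String) : String :=
  let words := PySem.Str.split₀ s
  let out_words := (List.range words.length).foldl
    (fun (out_words : List String) (i : Nat) =>
      if (["facing", "heading"].contains (PySem.Str.lower (PySem.List.pyGetD words (i : Int) ""))
          && ["north", "east", "west", "south"].contains
              (PySem.Str.stripChars (PySem.Str.lower (PySem.List.pyGetD words ((i : Int) + 1) "")) ",")) then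
        out_words
      else if (["north", "east", "west", "south"].contains
                (PySem.Str.stripChars
                  (PySem.Str.lower (PySem.Str.lower (PySem.List.pyGetD words (i : Int) ""))) ",")
              && ["facing", "heading"].contains (PySem.Str.lower (PySem.List.pyGetD words ((i : Int) - 1) ""))) then
        out_words
      else out_words ++ [PySem.List.pyGetD words (i : Int) ""])
    []
  PySem.Str.join " " out_words

-- ===== PORT B =====
def oaP (w : String) : Bool := ["facing", "heading"].contains (PySem.Str.lower w)
def oaD (w : String) : Bool :=
  ["north", "east", "west", "south"].contains (PySem.Str.stripChars (PySem.Str.lower w) ",")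

-- B's while-loop consumes the word list from the front: drop a matched pair, else keep one word.
def oaLoop : List String → List String
  | [] => []
  | [x] => [x]
  | x :: y :: rest =>
    if oaP x && oaD y then oaLoop rest
    else x :: oaLoop (y :: rest)

def orientation_ambiguity_alt (s : String) : String :=
  PySem.Str.join " " (oaLoop (PySem.Str.split₀ s))

-- ===== PRECONDITION & SPEC =====
-- Pre_ excludes exactly the inputs on which A raises IndexError: those whose last
-- whitespace-separated word lowercases to "facing" or "heading" (the words[i+1] lookahead).
def Pre_orientation_ambiguity (s : String) : Prop :=
  ((PySem.Str.split₀ s).getLast?.all fun w =>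
    !(PySem.Str.lower w == "facing" || PySem.Str.lower w == "heading")) = true
instance (s : String) : Decidable (Pre_orientation_ambiguity s) := by
  unfold Pre_orientation_ambiguity; infer_instance
def pvWitness_orientation_ambiguity : String := "I am facing North, then heading west now"

-- A raises IndexError when the last word lowercases to "facing"/"heading"; B keeps that word.
def Raises_orientation_ambiguity (s : String) : Prop :=
  ((PySem.Str.split₀ s).getLast?.any fun w =>
    PySem.Str.lower w == "facing" || PySem.Str.lower w == "heading") = true
instance (s : String) : Decidable (Raises_orientation_ambiguity s) := by
  unfold Raises_orientation_ambiguity; infer_instance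
def pvRaiseWitness_orientation_ambiguity : String := "go heading"
def pvRaiseWitnessOut_orientation_ambiguity : String := "go heading"

def Spec_orientation_ambiguity (s : String) (out : String) : Prop := out = orientation_ambiguity_alt s
instance (s : String) (out : String) : Decidable (Spec_orientation_ambiguity s out) := by
  unfold Spec_orientation_ambiguity; infer_instance

-- ===== CLAIM (what is proved, stated in full; the proofs are below) =====
def Claim_equal_orientation_ambiguity : Prop := ∀ (s : String), Dom_orientation_ambiguity s → Pre_orientation_ambiguity s → Spec_orientation_ambiguity s (orientation_ambiguity s)
def Claim_raises_orientation_ambiguity : Prop := (∀ (s : String), Dom_orientation_ambiguity s → Raises_orientation_ambiguity s → ¬ Pre_orientation_ambiguity s) ∧ (Dom_orientation_ambiguity (pvRaiseWitness_orientation_ambiguity) ∧ Raises_orientation_ambiguity (pvRaiseWitness_orientation_ambiguity) ∧ orientation_ambiguity_alt (pvRaiseWitness_orientation_ambiguity) = pvRaiseWitnessOut_orientation_ambiguity)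

-- ===== LEMMAS AND PROOFS =====

theorem oa_char_le_iff_toNat (a b : Char) : a ≤ b ↔ a.toNat ≤ b.toNat := by
  rw [Char.le_def, Char.toNat, Char.toNat, UInt32.le_iff_toNat_le]

theorem oa_toNat_ofNat_valid (n : Nat) (h : n < 55296) : (Char.ofNat n).toNat = n := by
  rw [Char.ofNat, dif_pos (Or.inl h : n.isValidChar)]
  simp [Char.ofNatAux]

theorem oa_lowerChar_idem (c : Char) :
    PySem.Chars.lowerChar (PySem.Chars.lowerChar c) = PySem.Chars.lowerChar c := by
  unfold PySem.Chars.lowerChar PySem.Chars.isupper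
  split_ifs with h1 h2 <;> try rfl
  exfalso
  simp only [Bool.and_eq_true, decide_eq_true_eq, oa_char_le_iff_toNat] at h1 h2
  have hZ : ('Z').toNat = 90 := by decide
  have hA : ('A').toNat = 65 := by decide
  rw [hA, hZ] at h1 h2
  rw [oa_toNat_ofNat_valid (c.toNat + 32) (by omega)] at h2
  omega

theorem oa_lower_idem (s : String) :
    PySem.Str.lower (PySem.Str.lower s) = PySem.Str.lower s := by
  simp [PySem.Str.lower, PySem.Chars.lower, List.map_map, Function.comp_def, oa_lowerChar_idem]

theorem oa_disjoint (w : String) (h : oaP w = true) : oaD w = false := by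
  unfold oaP at h
  simp only [List.contains_eq_mem, List.mem_cons, List.not_mem_nil, or_false,
    decide_eq_true_eq] at h
  unfold oaD
  rcases h with h | h <;> rw [h] <;> decide

theorem oa_not_p_of_d (w : String) (h : oaD w = true) : oaP w = false := by
  by_cases hp : oaP w = true
  · rw [oa_disjoint w hp] at h; exact absurd h (by simp)
  · simpa using hp

-- A's loop body with Nat indexing and the word before the window made explicit.
def oaStep (prev : String) (ws : List String) (acc : List String) (i : Nat) : List String :=
  if oaP (ws.getD i "") && oaD (ws.getD (i + 1) "") then acc
  else if oaD (ws.getD i "") && oaP (if i = 0 then prev else ws.getD (i - 1) "") then acc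
  else acc ++ [ws.getD i ""]

theorem oaStep_shift (prev x : String) (t : List String) (acc : List String) (i : Nat) :
    oaStep prev (x :: t) acc (i + 1) = oaStep x t acc i := by
  unfold oaStep
  rcases i with _ | j <;> simp

theorem oa_peel (t : List String) (x prev : String) (acc : List String) :
    (List.range (x :: t).length).foldl (oaStep prev (x :: t)) acc
      = (List.range t.length).foldl (oaStep x t) (oaStep prev (x :: t) acc 0) := by
  rw [show (x :: t).length = t.length + 1 from rfl, List.range_succ_eq_map, List.foldl_cons,
    List.foldl_map]
  apply PySem.List.foldl_congr_mem
  intro acc' i _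
  exact oaStep_shift prev x t acc' i

theorem oa_main : ∀ (ws : List String) (prev : String) (acc : List String),
    (oaD (ws.getD 0 "") && oaP prev) = false →
    (List.range ws.length).foldl (oaStep prev ws) acc = acc ++ oaLoop ws := by
  intro ws
  induction ws using oaLoop.induct with
  | case1 => intro prev acc _; simp [oaLoop]
  | case2 x =>
    intro prev acc h
    simp only [List.getD_cons_zero] at h
    simp only [List.length_cons, List.length_nil, Nat.zero_add, List.range_one,
      List.foldl_cons, List.foldl_nil, oaLoop]
    unfold oaStep
    simp only [List.getD_cons_zero, List.getD_cons_succ, List.getD_nil]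
    rw [show oaD "" = false from by decide, Bool.and_false, if_neg (by simp)]
    rw [if_neg (by simp [h])]
  | case3 x y rest hxy ih =>
    intro prev acc h
    simp only [List.getD_cons_zero] at h
    rw [oa_peel, oa_peel]
    have hpy : oaP y = false := oa_not_p_of_d y (by
      rcases Bool.and_eq_true _ _ |>.mp hxy with ⟨_, hdy⟩; exact hdy)
    have hdy : oaD y = true := (Bool.and_eq_true _ _ |>.mp hxy).2
    have hpx : oaP x = true := (Bool.and_eq_true _ _ |>.mp hxy).1
    have h0 : oaStep prev (x :: y :: rest) acc 0 = acc := by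
      unfold oaStep
      simp [List.getD_cons_zero, hxy]
    have h1 : oaStep x (y :: rest) acc 0 = acc := by
      unfold oaStep
      simp [List.getD_cons_zero, hpy, hdy, hpx]
    rw [h0, h1, ih y acc (by simp [hpy])]
    simp [oaLoop, hxy]
  | case4 x y rest hxy ih =>
    intro prev acc h
    simp only [List.getD_cons_zero] at h
    rw [oa_peel]
    have h0 : oaStep prev (x :: y :: rest) acc 0 = acc ++ [x] := by
      unfold oaStep
      simp only [List.getD_cons_zero, List.getD_cons_succ]
      rw [if_neg (by simp [hxy]), if_neg (by simp [h])]
    have h' : (oaD ((y :: rest).getD 0 "") && oaP x) = false := by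
      simp only [List.getD_cons_zero]
      cases hpx : oaP x
      · simp
      · have := oa_disjoint x hpx
        rcases Bool.and_eq_false_iff.mp (by simpa using hxy : (oaP x && oaD y) = false) with
          h1 | h1
        · rw [hpx] at h1; exact absurd h1 (by simp)
        · simp [h1]
    rw [h0, ih x (acc ++ [x]) h']
    simp [oaLoop, hxy]

-- ===== VERDICT (by name: the statement is the Claim_ definition above) =====
theorem orientation_ambiguity_spec : Claim_equal_orientation_ambiguity := by
  intro s _ hpre
  unfold Spec_orientation_ambiguity orientation_ambiguity orientation_ambiguity_alt
  dsimp only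
  set ws := PySem.Str.split₀ s with hws
  unfold Pre_orientation_ambiguity at hpre
  rw [← hws] at hpre
  congr 1
  have hcongr : (List.range ws.length).foldl
      (fun (out_words : List String) (i : Nat) =>
        if (["facing", "heading"].contains (PySem.Str.lower (PySem.List.pyGetD ws (i : Int) ""))
            && ["north", "east", "west", "south"].contains
                (PySem.Str.stripChars (PySem.Str.lower (PySem.List.pyGetD ws ((i : Int) + 1) "")) ",")) then
          out_words
        else if (["north", "east", "west", "south"].contains
                  (PySem.Str.stripChars
                    (PySem.Str.lower (PySem.Str.lower (PySem.List.pyGetD ws (i : Int) ""))) ",")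
                && ["facing", "heading"].contains (PySem.Str.lower (PySem.List.pyGetD ws ((i : Int) - 1) ""))) then
          out_words
        else out_words ++ [PySem.List.pyGetD ws (i : Int) ""]) []
      = (List.range ws.length).foldl (oaStep "" ws) [] := by
    apply PySem.List.foldl_congr_mem
    intro acc i hi
    have hilt : i < ws.length := List.mem_range.mp hi
    have hne : ws ≠ [] := by
      intro hnil; rw [hnil] at hilt; simp at hilt
    have g1 : PySem.List.pyGetD ws (i : Int) "" = ws.getD i "" := by
      rw [PySem.List.pyGetD_natCast]
    have g2 : PySem.List.pyGetD ws ((i : Int) + 1) "" = ws.getD (i + 1) "" := by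
      rw [show ((i : Int) + 1) = ((i + 1 : Nat) : Int) from by push_cast; ring,
        PySem.List.pyGetD_natCast]
    have g3 : ["facing", "heading"].contains
        (PySem.Str.lower (PySem.List.pyGetD ws ((i : Int) - 1) ""))
        = oaP (if i = 0 then "" else ws.getD (i - 1) "") := by
      rcases Nat.eq_zero_or_pos i with h0 | h0
      · subst h0
        rw [show ((0 : Nat) : Int) - 1 = (-1 : Int) from by norm_num]
        rw [PySem.List.pyGetD_neg_one ws "" hne]
        have hlast : ws.getLast? = some (ws.getLast hne) := List.getLast?_eq_some_getLast hne
        rw [hlast] at hpre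
        simp only [Option.all_some, Bool.not_eq_eq_eq_not, Bool.not_true, Bool.or_eq_false_iff,
          beq_eq_false_iff_ne, ne_eq] at hpre
        have hL : ["facing", "heading"].contains (PySem.Str.lower (ws.getLast hne)) = false := by
          simp only [List.contains_eq_mem, List.mem_cons, List.not_mem_nil, or_false,
            decide_eq_false_iff_not]
          rintro (hm | hm)
          · exact hpre.1 hm
          · exact hpre.2 hm
        have hR : oaP (if (0 : Nat) = 0 then "" else ws.getD (0 - 1) "") = false := by
          rw [if_pos rfl]; decide
        rw [hL, hR]
      · rw [show ((i : Int) - 1) = ((i - 1 : Nat) : Int) from by omega]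
        rw [if_neg (by omega)]
        simp [PySem.List.pyGetD_natCast, oaP]
    rw [g1, g2, g3, oa_lower_idem]
    rfl
  rw [hcongr, oa_main ws "" [] (by simp [oaP, show PySem.Str.lower "" = "" from by decide])]
  simp

@[simp]
theorem orientation_ambiguity_raises : Claim_raises_orientation_ambiguity := by
  unfold Claim_raises_orientation_ambiguity
  constructor
  · intro s _ hr hp
    unfold Raises_orientation_ambiguity at hr
    unfold Pre_orientation_ambiguity at hp
    cases hlast : (PySem.Str.split₀ s).getLast? with
    | none => rw [hlast] at hr; simp at hr
    | some w =>
      rw [hlast] at hr hp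
      simp only [Option.any_some] at hr
      simp only [Option.all_some, Bool.not_eq_eq_eq_not, Bool.not_true] at hp
      rw [hr] at hp; exact absurd hp (by simp)
  · exact ⟨by decide, by decide, by decide⟩
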